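-- pv_equiv track=rewrite | github.com/mnikhil-git/bioinformatics | lib/bmp/replication.py | ClumpFind
-- ===== SOURCE A (Python) =====
-- def ClumpFind( s, k, L, t ):
--     out = []
--     for start in range(len(s)-L+1):
--         window = s[start:start+L]
--         counts = {}
--         for i in range(len(window)-k+1):
--             if window[i:i+k] not in counts:
--                 counts[window[i:i+k]] = 0
--             counts[window[i:i+k]] += 1
--         for kmer in counts:
--             if counts[kmer] >= t and kmer not in out:
--                 out.append(kmer)
--     return out
-- ===== SOURCE B (Python) =====
-- def ClumpFind(s, k, L, t):
--     # Same (L,t)-clump result as A, but with no counting dict: sort the window's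
--     # k-mer list and read off the qualifying k-mers from run lengths, then make
--     # one pass over the k-mers in window order to append them first-seen-first.
--     out = []
--     for start in range(len(s) - L + 1):
--         window = s[start:start + L]
--         kms = [window[i:i + k] for i in range(len(window) - k + 1)]
--         qual = []
--         prev = None
--         run = 0
--         for x in sorted(kms):
--             if x == prev:
--                 run += 1
--             else:
--                 if prev is not None and run >= t:
--                     qual.append(prev)
--                 prev = x
--                 run = 1
--         if prev is not None and run >= t:
--             qual.append(prev)
--         for kmer in kms:
--             if kmer in qual and kmer not in out:
--                 out.append(kmer)
--     return out
-- ===== Notes on version B (the rewrite author's own statement) =====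
-- stated objective: alternative
-- what changed: B drops A's per-window counting dict and second keys pass: it sorts the window's k-mer list, reads the qualifying k-mers off the run lengths of the sorted list, and appends them in one pass over the window's k-mers in order.
import Mathlib
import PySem

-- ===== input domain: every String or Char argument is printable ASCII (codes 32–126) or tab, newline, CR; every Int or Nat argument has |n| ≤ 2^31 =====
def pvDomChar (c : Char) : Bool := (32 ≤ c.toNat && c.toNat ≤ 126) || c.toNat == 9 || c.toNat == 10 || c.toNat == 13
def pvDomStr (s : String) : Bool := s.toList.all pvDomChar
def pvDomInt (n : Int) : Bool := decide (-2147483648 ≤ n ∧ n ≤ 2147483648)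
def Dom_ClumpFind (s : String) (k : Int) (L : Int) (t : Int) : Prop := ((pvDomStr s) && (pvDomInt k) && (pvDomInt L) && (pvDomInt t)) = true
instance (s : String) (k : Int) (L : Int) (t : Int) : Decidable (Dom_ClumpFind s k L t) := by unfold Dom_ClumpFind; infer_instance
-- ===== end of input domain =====

-- B replaces A's per-window counting dict + keys pass by sorting the window's
-- k-mer list and reading the qualifying k-mers off the run lengths (objective: alternative).

-- ===== PORT A =====
def ClumpFind (s : String) (k : Int) (L : Int) (t : Int) : List String :=
  (PySem.List.pyRange 0 (PySem.Str.len s - L + 1) 1).foldl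
    (fun out start =>
      let window := PySem.Str.slice s (some start) (some (start + L))
      let counts :=
        (PySem.List.pyRange 0 (PySem.Str.len window - k + 1) 1).foldl
          (fun counts i =>
            let counts :=
              if counts.contains (PySem.Str.slice window (some i) (some (i + k))) = false then
                counts.insert (PySem.Str.slice window (some i) (some (i + k))) 0
              else counts
            counts.insert (PySem.Str.slice window (some i) (some (i + k)))
              (counts.getD (PySem.Str.slice window (some i) (some (i + k))) 0 + 1))
          PySem.Dict.empty
      counts.keys.foldl
        (fun out kmer =>
          if counts.getD kmer 0 ≥ t ∧ kmer ∉ out then out ++ [kmer] else out)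
        out)
    []

-- ===== PORT B =====
-- the body of B's scan over the sorted k-mer list: state (qual, prev, run)
def runStep (t : Int) (st : List String × Option String × Int) (x : String) :
    List String × Option String × Int :=
  if st.2.1 = some x then (st.1, st.2.1, st.2.2 + 1)
  else
    ((match st.2.1 with
      | some p => if st.2.2 ≥ t then st.1 ++ [p] else st.1
      | none => st.1), some x, (1 : Int))

-- B's trailing "if prev is not None and run >= t: qual.append(prev)"
def flushRun (t : Int) (st : List String × Option String × Int) : List String :=
  match st.2.1 with
  | some p => if st.2.2 ≥ t then st.1 ++ [p] else st.1
  | none => st.1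

def ClumpFind_alt (s : String) (k : Int) (L : Int) (t : Int) : List String :=
  (PySem.List.pyRange 0 (PySem.Str.len s - L + 1) 1).foldl
    (fun out start =>
      let window := PySem.Str.slice s (some start) (some (start + L))
      let kms :=
        (PySem.List.pyRange 0 (PySem.Str.len window - k + 1) 1).map
          (fun i => PySem.Str.slice window (some i) (some (i + k)))
      let qual :=
        flushRun t
          ((PySem.List.sorted kms (fun x => x)).foldl (runStep t)
            (([] : List String), (none : Option String), (0 : Int)))
      kms.foldl
        (fun out kmer => if kmer ∈ qual ∧ kmer ∉ out then out ++ [kmer] else out)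
        out)
    []

-- ===== PRECONDITION & SPEC =====
def Spec_ClumpFind (s : String) (k : Int) (L : Int) (t : Int) (out : List String) : Prop := out = ClumpFind_alt s k L t
instance (s : String) (k : Int) (L : Int) (t : Int) (out : List String) : Decidable (Spec_ClumpFind s k L t out) := by unfold Spec_ClumpFind; infer_instance

-- ===== CLAIM (what is proved, stated in full; the proofs are below) =====
def Claim_equal_ClumpFind : Prop := ∀ (s : String) (k : Int) (L : Int) (t : Int), Dom_ClumpFind s k L t → Spec_ClumpFind s k L t (ClumpFind s k L t)

-- ===== LEMMAS AND PROOFS =====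

-- "append x if it is new and qualifies" — the step both per-window output loops reduce to
def addIf (c : String → Prop) [DecidablePred c] (acc : List String) (x : String) : List String :=
  if x ∉ acc ∧ c x then acc ++ [x] else acc

lemma subset_addIf (c : String → Prop) [DecidablePred c] (acc : List String) (x : String) :
    acc ⊆ addIf c acc x := by
  unfold addIf; split_ifs <;> simp

lemma subset_foldl_addIf (c : String → Prop) [DecidablePred c] :
    ∀ (l acc : List String), acc ⊆ l.foldl (addIf c) acc := by
  intro l
  induction l with
  | nil => intro acc; simp
  | cons a l ih =>
    intro acc
    exact (subset_addIf c acc a).trans (ih (addIf c acc a))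

lemma addIf_of_handled (c : String → Prop) [DecidablePred c] {acc : List String} {x : String}
    (h : x ∈ acc ∨ ¬ c x) : addIf c acc x = acc := by
  unfold addIf
  rcases h with h | h
  · rw [if_neg]; simp [h]
  · rw [if_neg]; simp [h]

lemma mem_foldl_addIf_or (c : String → Prop) [DecidablePred c] :
    ∀ (l acc : List String) (x : String), x ∈ l → x ∈ l.foldl (addIf c) acc ∨ ¬ c x := by
  intro l
  induction l with
  | nil => intro acc x hx; cases hx
  | cons a l ih =>
    intro acc x hx
    by_cases hc : c x
    · rcases List.mem_cons.mp hx with rfl | hx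
      · left
        have hmem : x ∈ addIf c acc x := by
          unfold addIf
          split_ifs with h
          · simp
          · by_contra hxa
            exact h ⟨hxa, hc⟩
        exact subset_foldl_addIf c l (addIf c acc x) hmem
      · exact ih (addIf c acc a) x hx
    · right; exact hc

lemma foldl_addIf_ofList (c : String → Prop) [DecidablePred c] :
    ∀ (l acc : List String),
      (PySem.Set.ofList l).foldl (addIf c) acc = l.foldl (addIf c) acc := by
  intro l
  induction l using List.reverseRecOn with
  | nil => intro acc; rfl
  | append_singleton l x ih =>
    intro acc
    have hof : PySem.Set.ofList (l ++ [x]) = PySem.Set.add (PySem.Set.ofList l) x := by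
      rw [PySem.Set.ofList_eq_foldl, PySem.Set.ofList_eq_foldl, List.foldl_append]
      rfl
    rw [hof, List.foldl_append]
    by_cases hx : x ∈ l
    · rw [PySem.Set.add_of_mem ((PySem.Set.mem_ofList l x).mpr hx), ih]
      have := mem_foldl_addIf_or c l acc x hx
      simp only [List.foldl_cons, List.foldl_nil]
      exact (addIf_of_handled c this).symm
    · rw [PySem.Set.add_of_not_mem (fun h => hx ((PySem.Set.mem_ofList l x).mp h))]
      rw [List.foldl_append, ih]

lemma stepA_eq (d : PySem.Dict String Int) (key : String) :
    (if d.contains key = false then d.insert key 0 else d).insert key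
        ((if d.contains key = false then d.insert key 0 else d).getD key 0 + 1)
      = d.insert key (d.getD key 0 + 1) := by
  by_cases h : d.contains key = true
  · simp [h]
  · have hfalse : d.contains key = false := by simpa using h
    have hnone : d.get? key = none := by
      have := PySem.Dict.contains_eq_isSome_get? d key
      rw [hfalse] at this
      exact Option.not_isSome_iff_eq_none.mp (by simp [← this])
    have hgd0 : d.getD key 0 = 0 := by
      show (d.get? key).getD 0 = 0
      rw [hnone]; rfl
    have hgd1 : (d.insert key 0).getD key 0 = 0 := by
      show ((d.insert key 0).get? key).getD 0 = 0
      rw [PySem.Dict.get?_insert_self]; rfl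
    rw [if_pos hfalse, hgd1, hgd0, PySem.Dict.insert_insert_self]

lemma buildA_eq (w : String) (k : Int) :
    ∀ (I : List Int) (d : PySem.Dict String Int),
      I.foldl
        (fun counts i =>
          (if counts.contains (PySem.Str.slice w (some i) (some (i + k))) = false then
              counts.insert (PySem.Str.slice w (some i) (some (i + k))) 0
            else counts).insert (PySem.Str.slice w (some i) (some (i + k)))
            ((if counts.contains (PySem.Str.slice w (some i) (some (i + k))) = false then
                counts.insert (PySem.Str.slice w (some i) (some (i + k))) 0
              else counts).getD (PySem.Str.slice w (some i) (some (i + k))) 0 + 1)) d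
      = (I.map (fun i => PySem.Str.slice w (some i) (some (i + k)))).foldl
          (fun d' key => d'.insert key (d'.getD key 0 + 1)) d := by
  intro I
  induction I with
  | nil => intro d; rfl
  | cons i I ih =>
    intro d
    simp only [List.foldl_cons, List.map_cons]
    rw [stepA_eq, ih]

-- A's per-window dict pass, reduced to the addIf fold over the k-mer list itself
lemma phase2_eq (ks : List String) (t : Int) (out : List String) :
    (PySem.Dict.counter ks).keys.foldl
        (fun acc kmer =>
          if (PySem.Dict.counter ks).getD kmer 0 ≥ t ∧ kmer ∉ acc then acc ++ [kmer] else acc)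
        out
      = ks.foldl (addIf (fun x => (List.count x ks : Int) ≥ t)) out := by
  rw [PySem.Dict.keys_counter]
  have hA : (PySem.Set.ofList ks).foldl
      (fun acc kmer =>
        if (PySem.Dict.counter ks).getD kmer 0 ≥ t ∧ kmer ∉ acc then acc ++ [kmer] else acc) out
      = (PySem.Set.ofList ks).foldl (addIf (fun x => (List.count x ks : Int) ≥ t)) out := by
    apply PySem.List.foldl_congr_mem
    intro acc x _
    unfold addIf
    rw [PySem.Dict.getD_counter]
    by_cases h1 : x ∈ acc <;> by_cases h2 : (List.count x ks : Int) ≥ t <;> simp [h1, h2]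
  rw [hA, foldl_addIf_ofList]

-- the qualifying k-mers B's run scan emits, as a structural recursion (proof-side only)
def emit (t : Int) : List String → String → Int → List String
  | [], p, r => if r ≥ t then [p] else []
  | x :: l, p, r =>
    if x = p then emit t l p (r + 1) else (if r ≥ t then [p] else []) ++ emit t l x 1

lemma emit_nil (t : Int) (p : String) (r : Int) :
    emit t [] p r = if r ≥ t then [p] else [] := rfl

lemma emit_cons (t : Int) (x : String) (l : List String) (p : String) (r : Int) :
    emit t (x :: l) p r
      = if x = p then emit t l p (r + 1) else (if r ≥ t then [p] else []) ++ emit t l x 1 := rfl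

lemma flushRun_foldl (t : Int) :
    ∀ (l q : List String) (p : String) (r : Int),
      flushRun t (l.foldl (runStep t) (q, some p, r)) = q ++ emit t l p r := by
  intro l
  induction l with
  | nil =>
    intro q p r
    simp only [List.foldl_nil, emit_nil]
    unfold flushRun
    split_ifs <;> simp
  | cons x l ih =>
    intro x0 p r
    simp only [List.foldl_cons, emit_cons]
    by_cases hpx : p = x
    · have hstep : runStep t (x0, some p, r) x = (x0, some p, r + 1) := by
        simp [runStep, hpx]
      rw [hstep, ih, if_pos (show x = p from hpx.symm)]
    · have hstep : runStep t (x0, some p, r) x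
          = ((if r ≥ t then x0 ++ [p] else x0), some x, (1 : Int)) := by
        simp only [runStep]
        rw [if_neg (by simp [hpx])]
      rw [hstep, ih, if_neg (show ¬x = p from fun h => hpx h.symm)]
      split_ifs <;> simp
lemma scan_eq (t : Int) (l : List String) :
    flushRun t (l.foldl (runStep t) (([] : List String), (none : Option String), (0 : Int)))
      = match l with
        | [] => []
        | x :: rest => emit t rest x 1 := by
  cases l with
  | nil => rfl
  | cons x rest =>
    have hstep : runStep t (([] : List String), (none : Option String), (0 : Int)) x
        = (([] : List String), some x, (1 : Int)) := by
      simp only [runStep]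
      rw [if_neg (by simp)]
    simp only [List.foldl_cons, hstep]
    rw [flushRun_foldl]
    simp

lemma emit_mem (t : Int) :
    ∀ (l : List String) (p : String) (r : Int), (p :: l).Pairwise (· ≤ ·) →
      ∀ x, (x ∈ emit t l p r
        ↔ (x = p ∧ r + (List.count p l : Int) ≥ t)
          ∨ (x ∈ l ∧ x ≠ p ∧ (List.count x l : Int) ≥ t)) := by
  intro l
  induction l with
  | nil =>
    intro p r _ x
    rw [emit_nil]
    split_ifs with h <;> simp_all
  | cons y l ih =>
    intro p r hs x
    rw [emit_cons]
    by_cases hyp : y = p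
    · rw [if_pos hyp]
      subst hyp
      have hs' : (y :: l).Pairwise (· ≤ ·) :=
        hs.sublist ((List.sublist_cons_self y l).cons₂ y)
      rw [ih y (r + 1) hs' x]
      by_cases hxp : x = y
      · subst hxp
        simp [List.count_cons_self]
        omega
      · have hcc : List.count x (y :: l) = List.count x l :=
          List.count_cons_of_ne (fun h => hxp h.symm)
        simp [hxp, hcc, List.mem_cons]
    · rw [if_neg hyp]
      have hple : ∀ b ∈ y :: l, p ≤ b := (List.pairwise_cons.mp hs).1
      have hs' : (y :: l).Pairwise (· ≤ ·) := (List.pairwise_cons.mp hs).2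
      have hpy : p < y := lt_of_le_of_ne (hple y (by simp)) (fun h => hyp h.symm)
      have hpy' : p ≠ y := ne_of_lt hpy
      have hpnot : p ∉ y :: l := by
        intro hmem
        rcases List.mem_cons.mp hmem with h | h
        · exact hpy' h
        · exact absurd ((List.pairwise_cons.mp hs').1 p h) (not_le.mpr hpy)
      have hpl : p ∉ l := fun h => hpnot (List.mem_cons_of_mem y h)
      have hcnt0 : List.count p (y :: l) = 0 := List.count_eq_zero.mpr hpnot
      rw [List.mem_append, ih y 1 hs' x]
      by_cases hxp : x = p
      · subst hxp
        simp only [hcnt0, Nat.cast_zero, add_zero]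
        constructor
        · rintro (hm | hm)
          · split_ifs at hm with hr
            · exact Or.inl (by simp [hr])
            · simp at hm
          · exfalso
            rcases hm with ⟨heq, _⟩ | ⟨hm, _, _⟩
            · exact hpy' heq
            · exact hpl hm
        · rintro (⟨_, hr⟩ | ⟨hm, _, _⟩)
          · left; simp [hr]
          · exact absurd hm hpnot
      · by_cases hxy : x = y
        · subst hxy
          constructor
          · rintro (hm | hm)
            · exfalso; split_ifs at hm <;> simp_all
            · rcases hm with ⟨_, hc⟩ | ⟨_, hne, _⟩
              · refine Or.inr ⟨by simp, hxp, ?_⟩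
                rw [List.count_cons_self]
                push_cast
                omega
              · exact absurd rfl hne
          · rintro (⟨heq, _⟩ | ⟨_, _, hc⟩)
            · exact absurd heq hxp
            · right; left
              refine ⟨rfl, ?_⟩
              rw [List.count_cons_self] at hc
              push_cast at hc
              omega
        · have hcc : List.count x (y :: l) = List.count x l :=
            List.count_cons_of_ne (fun h => hxy h.symm)
          constructor
          · rintro (hm | hm)
            · exfalso; split_ifs at hm <;> simp_all
            · rcases hm with ⟨heq, _⟩ | ⟨hm, _, hc⟩
              · exact absurd heq hxy
              · exact Or.inr ⟨List.mem_cons_of_mem y hm, hxp, by rw [hcc]; exact hc⟩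
          · rintro (⟨heq, _⟩ | ⟨hm, _, hc⟩)
            · exact absurd heq hxp
            · right; right
              refine ⟨?_, hxy, ?_⟩
              · rcases List.mem_cons.mp hm with h | h
                · exact absurd h hxy
                · exact h
              · rw [hcc] at hc; exact hc

-- membership in B's qual list is exactly "this k-mer occurs ≥ t times in the window"
lemma mem_qual_iff (t : Int) (kms : List String) (x : String) (hx : x ∈ kms) :
    (x ∈ flushRun t
        ((PySem.List.sorted kms (fun x => x)).foldl (runStep t)
          (([] : List String), (none : Option String), (0 : Int))))
      ↔ (List.count x kms : Int) ≥ t := by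
  have hperm := PySem.List.sorted_perm kms (fun x => x) false
  have hpair := PySem.List.sorted_pairwise kms (fun x => x)
  rw [scan_eq]
  rcases hsrt : PySem.List.sorted kms (fun x => x) with _ | ⟨y, rest⟩
  · rw [hsrt] at hperm
    exact absurd (hperm.symm.mem_iff.mp hx) (by simp)
  · rw [hsrt] at hperm hpair
    have hx' : x ∈ y :: rest := hperm.mem_iff.mpr hx
    have hcnt : List.count x (y :: rest) = List.count x kms := hperm.count_eq x
    rw [emit_mem t rest y 1 hpair x, ← hcnt]
    by_cases hxy : x = y
    · subst hxy
      simp [List.count_cons_self]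
      omega
    · have hxl : x ∈ rest := by
        rcases List.mem_cons.mp hx' with h | h
        · exact absurd h hxy
        · exact h
      have hcc : List.count x (y :: rest) = List.count x rest :=
        List.count_cons_of_ne (fun h => hxy h.symm)
      simp [hxy, hxl, hcc]

-- ===== VERDICT (by name: the statement is the Claim_ definition above) =====
theorem ClumpFind_spec : Claim_equal_ClumpFind := by
  unfold Claim_equal_ClumpFind
  intro s k L t _
  unfold Spec_ClumpFind ClumpFind ClumpFind_alt
  apply PySem.List.foldl_congr_mem
  intro out start _
  dsimp only
  rw [buildA_eq, PySem.Dict.foldl_insert_getD_add_one_eq_counter, phase2_eq]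
  apply PySem.List.foldl_congr_mem
  intro acc x hx
  unfold addIf
  have hq := mem_qual_iff t _ x hx
  split_ifs with h1 h2 h2
  · rfl
  · exact absurd ⟨hq.mpr h1.2, h1.1⟩ h2
  · exact absurd ⟨h2.2, hq.mp h2.1⟩ h1
  · rfl
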